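-- pv_equiv track=rewrite | github.com/vadim-zyamalov/advent-of-code | 2019/day-13/part1.py | parse
-- ===== SOURCE A (Python) =====
-- def parse(data, tiles):
--     oi = iter(data)
--     scores = []
--     ball = None
--     bat = None
--
--     for x, y, t in zip(oi, oi, oi):
--         if (x, y) == (-1, 0):
--             scores.append(t)
--         else:
--             if t == 4:
--                 ball = (x, y)
--             elif t == 3:
--                 bat = (x, y)
--             tiles[x, y] = t
--     return scores, ball, bat
-- ===== SOURCE B (Python) =====
-- def parse(data, tiles):
--     n = len(data) - len(data) % 3
--     triples = [(data[i], data[i + 1], data[i + 2]) for i in range(0, n, 3)]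
--     scores = [t for x, y, t in triples if (x, y) == (-1, 0)]
--     ball = next(((x, y) for x, y, t in reversed(triples)
--                  if (x, y) != (-1, 0) and t == 4), None)
--     bat = next(((x, y) for x, y, t in reversed(triples)
--                 if (x, y) != (-1, 0) and t == 3), None)
--     for x, y, t in triples:
--         if (x, y) != (-1, 0):
--             tiles[x, y] = t
--     return scores, ball, bat
-- ===== Notes on version B (the rewrite author's own statement) =====
-- stated objective: alternative
-- what changed: Replaces A's single fused loop carrying four pieces of state with a materialised list of triples and separate passes: a comprehension for scores, reversed last-occurrence searches for ball and bat, and a plain loop for the tiles-dict updates.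
import Mathlib
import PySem

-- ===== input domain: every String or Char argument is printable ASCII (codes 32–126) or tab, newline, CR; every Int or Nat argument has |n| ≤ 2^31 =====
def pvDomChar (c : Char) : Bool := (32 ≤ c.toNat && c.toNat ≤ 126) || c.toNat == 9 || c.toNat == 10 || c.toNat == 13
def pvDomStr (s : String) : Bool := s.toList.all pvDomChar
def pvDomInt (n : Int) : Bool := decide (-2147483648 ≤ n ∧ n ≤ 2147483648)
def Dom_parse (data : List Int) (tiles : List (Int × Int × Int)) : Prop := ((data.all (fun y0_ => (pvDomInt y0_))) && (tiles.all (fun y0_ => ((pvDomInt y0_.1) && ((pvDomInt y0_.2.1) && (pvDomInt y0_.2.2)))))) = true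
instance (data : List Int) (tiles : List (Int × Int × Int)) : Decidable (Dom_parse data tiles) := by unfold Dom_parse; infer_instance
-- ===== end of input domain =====

-- B splits A's fused loop into separate passes (score comprehension, reversed last-occurrence
-- searches for ball/bat, tiles loop) over a materialised triple list; equivalence proved here
-- is about the RETURN value only — both Pythons mutate `tiles` identically in place.

-- ===== PORT A =====
-- zip(oi, oi, oi) over iter(data): consecutive disjoint triples, remainder dropped (shared by both ports)
def chunk3 : List Int → List (Int × Int × Int)
  | x :: y :: t :: rest => (x, y, t) :: chunk3 rest
  | _ => []

-- A's single loop, carried state (scores, ball, bat); tiles mutation does not affect the return value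
def parse (data : List Int) (tiles : List (Int × Int × Int)) : List Int × (Option (Int × Int)) × (Option (Int × Int)) :=
  (chunk3 data).foldl
    (fun s tr =>
      if tr.1 = -1 ∧ tr.2.1 = 0 then (s.1 ++ [tr.2.2], s.2.1, s.2.2)
      else if tr.2.2 = 4 then (s.1, some (tr.1, tr.2.1), s.2.2)
      else if tr.2.2 = 3 then (s.1, s.2.1, some (tr.1, tr.2.1))
      else s)
    ([], none, none)

-- ===== PORT B =====
def parse_alt (data : List Int) (tiles : List (Int × Int × Int)) : List Int × (Option (Int × Int)) × (Option (Int × Int)) :=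
  let triples := chunk3 data
  let scores := triples.filterMap (fun tr => if tr.1 = -1 ∧ tr.2.1 = 0 then some tr.2.2 else none)
  let ball := (triples.reverse.find? (fun tr => decide (¬(tr.1 = -1 ∧ tr.2.1 = 0) ∧ tr.2.2 = 4))).map (fun tr => (tr.1, tr.2.1))
  let bat := (triples.reverse.find? (fun tr => decide (¬(tr.1 = -1 ∧ tr.2.1 = 0) ∧ tr.2.2 = 3))).map (fun tr => (tr.1, tr.2.1))
  (scores, ball, bat)

-- ===== PRECONDITION & SPEC =====
def Spec_parse (data : List Int) (tiles : List (Int × Int × Int)) (out : List Int × (Option (Int × Int)) × (Option (Int × Int))) : Prop := out = parse_alt data tiles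
instance (data : List Int) (tiles : List (Int × Int × Int)) (out : List Int × (Option (Int × Int)) × (Option (Int × Int))) : Decidable (Spec_parse data tiles out) := by unfold Spec_parse; infer_instance

-- ===== CLAIM (what is proved, stated in full; the proofs are below) =====
def Claim_equal_parse : Prop := ∀ (data : List Int) (tiles : List (Int × Int × Int)), Dom_parse data tiles → Spec_parse data tiles (parse data tiles)

-- ===== LEMMAS AND PROOFS =====
theorem parse_loop_eq (L : List (Int × Int × Int))
    (s : List Int) (b q : Option (Int × Int)) :
    L.foldl
      (fun s tr =>
        if tr.1 = -1 ∧ tr.2.1 = 0 then (s.1 ++ [tr.2.2], s.2.1, s.2.2)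
        else if tr.2.2 = 4 then (s.1, some (tr.1, tr.2.1), s.2.2)
        else if tr.2.2 = 3 then (s.1, s.2.1, some (tr.1, tr.2.1))
        else s)
      (s, b, q)
    = (s ++ L.filterMap (fun tr => if tr.1 = -1 ∧ tr.2.1 = 0 then some tr.2.2 else none),
       ((L.reverse.find? (fun tr => decide (¬(tr.1 = -1 ∧ tr.2.1 = 0) ∧ tr.2.2 = 4))).map (fun tr => (tr.1, tr.2.1))).or b,
       ((L.reverse.find? (fun tr => decide (¬(tr.1 = -1 ∧ tr.2.1 = 0) ∧ tr.2.2 = 3))).map (fun tr => (tr.1, tr.2.1))).or q) := by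
  induction L generalizing s b q with
  | nil => simp
  | cons tr rest ih =>
    obtain ⟨x, y, t⟩ := tr
    simp only [List.foldl_cons, List.filterMap_cons, List.reverse_cons, List.find?_append]
    by_cases hs : x = -1 ∧ y = 0
    · simp [hs, ih, List.find?]
    · by_cases h4 : t = 4
      · have pe4 : (fun tr : Int × Int × Int => (!decide (tr.1 = -1) || !decide (tr.2.1 = 0)) && decide (tr.2.2 = 4))
            = (fun tr : Int × Int × Int => decide (¬(tr.1 = -1 ∧ tr.2.1 = 0) ∧ tr.2.2 = 4)) := by
          funext tr; simp
        rcases hf : rest.reverse.find? (fun tr => decide (¬(tr.1 = -1 ∧ tr.2.1 = 0) ∧ tr.2.2 = 4)) with _ | v <;>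
          simp [hs, h4, ih, List.find?] <;> rw [pe4, hf] <;> simp
      · by_cases h3 : t = 3
        · have pe3 : (fun tr : Int × Int × Int => (!decide (tr.1 = -1) || !decide (tr.2.1 = 0)) && decide (tr.2.2 = 3))
              = (fun tr : Int × Int × Int => decide (¬(tr.1 = -1 ∧ tr.2.1 = 0) ∧ tr.2.2 = 3)) := by
            funext tr; simp
          rcases hf : rest.reverse.find? (fun tr => decide (¬(tr.1 = -1 ∧ tr.2.1 = 0) ∧ tr.2.2 = 3)) with _ | v <;>
            simp [hs, h3, ih, List.find?] <;> rw [pe3, hf] <;> simp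
        · simp [hs, h4, h3, ih, List.find?]

-- ===== VERDICT (by name: the statement is the Claim_ definition above) =====
theorem parse_spec : Claim_equal_parse := by
  intro data tiles _
  unfold Spec_parse parse parse_alt
  simp [parse_loop_eq]
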